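-- pv_equiv track=rewrite | github.com/pierfrancescomartinello/MICO | problems/Partition_Problem/partition_problem.py | partition_greedy
-- ===== SOURCE A (Python) =====
-- def partition_greedy(nums):
--     # Step 1: Sort the numbers in descending order
--     sorted_nums = sorted(nums, reverse=True)
--
--     # Step 2: Initialize subsets and their sums
--     subsets = [[] for _ in range(len(nums))]
--     subset_sums = [0] * len(nums)
--
--     # Step 3: Assign each number to the subset with the smaller sum
--     for num in sorted_nums:
--         min_sum_index = subset_sums.index(min(subset_sums))
--         subsets[min_sum_index].append(num)
--         subset_sums[min_sum_index] += num
--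
--     return subsets, subset_sums
-- ===== SOURCE B (Python) =====
-- def partition_greedy(nums):
--     # Closed form of the greedy: with len(nums) subsets available, each positive
--     # number lands in its own subset (largest first) and all non-positive numbers
--     # pile into the single next subset; remaining subsets stay empty.
--     n = len(nums)
--     pos = sorted((x for x in nums if x > 0), reverse=True)
--     nonpos = sorted((x for x in nums if x <= 0), reverse=True)
--     subsets = [[x] for x in pos]
--     sums = list(pos)
--     if nonpos:
--         subsets.append(nonpos)
--         sums.append(sum(nonpos))
--     subsets += [[] for _ in range(n - len(subsets))]
--     sums += [0] * (n - len(sums))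
--     return subsets, sums
-- ===== Notes on version B (the rewrite author's own statement) =====
-- stated objective: faster
-- what changed: Replaces A's per-element argmin scan over the n subset sums with a closed form: one sort splits nums into descending positives (one per subset) and non-positives (all in the next subset), eliminating the simulation loop entirely.
import Mathlib
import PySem

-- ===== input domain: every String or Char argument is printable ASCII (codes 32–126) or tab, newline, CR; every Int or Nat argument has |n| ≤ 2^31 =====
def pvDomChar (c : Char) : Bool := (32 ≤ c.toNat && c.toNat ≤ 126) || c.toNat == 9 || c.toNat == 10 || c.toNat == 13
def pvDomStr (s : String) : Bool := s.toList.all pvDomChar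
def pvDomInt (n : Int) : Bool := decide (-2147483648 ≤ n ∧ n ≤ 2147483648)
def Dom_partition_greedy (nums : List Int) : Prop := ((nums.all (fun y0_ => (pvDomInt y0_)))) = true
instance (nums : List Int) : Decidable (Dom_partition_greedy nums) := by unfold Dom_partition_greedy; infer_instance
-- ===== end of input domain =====

-- B replaces A's argmin-scan simulation loop by a closed form (sort once, positives
-- each in their own subset, all non-positives in the next one); proved equal everywhere.

-- ===== PORT A =====
-- one loop iteration: min_sum_index = subset_sums.index(min(subset_sums)); append; add.
-- min()/index() raise only on an empty list; the sums list has length len(nums) ≥ 1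
-- whenever the loop body runs, so the `.getD` defaults are unreachable.
-- subsets[i].append(num) / subset_sums[i] += num are the in-place updates at index i.
def pgStep (st : List (List Int) × List Int) (num : Int) : List (List Int) × List Int :=
  let m := (PySem.List.min? st.2 (fun x => x)).getD 0
  let i := (PySem.List.index? st.2 m).getD 0
  (st.1.set i ((st.1.getD i []) ++ [num]), st.2.set i ((st.2.getD i 0) + num))

def partition_greedy (nums : List Int) : List (List Int) × List Int :=
  let sorted_nums := PySem.List.sorted nums (fun x => x) true
  let subsets := List.replicate nums.length ([] : List Int)
  let subset_sums := List.replicate nums.length (0 : Int)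
  List.foldl pgStep (subsets, subset_sums) sorted_nums

-- ===== PORT B =====
def partition_greedy_alt (nums : List Int) : List (List Int) × List Int :=
  let n := nums.length
  let pos := PySem.List.sorted (nums.filter (fun x => decide (0 < x))) (fun x => x) true
  let nonpos := PySem.List.sorted (nums.filter (fun x => decide (x ≤ 0))) (fun x => x) true
  let subsets := if nonpos = [] then pos.map (fun x => [x]) else pos.map (fun x => [x]) ++ [nonpos]
  let sums := if nonpos = [] then pos else pos ++ [nonpos.sum]
  (subsets ++ List.replicate (n - subsets.length) [], sums ++ List.replicate (n - sums.length) 0)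

-- ===== PRECONDITION & SPEC =====
def Spec_partition_greedy (nums : List Int) (out : List (List Int) × List Int) : Prop := out = partition_greedy_alt nums
instance (nums : List Int) (out : List (List Int) × List Int) : Decidable (Spec_partition_greedy nums out) := by unfold Spec_partition_greedy; infer_instance

-- ===== CLAIM (what is proved, stated in full; the proofs are below) =====
def Claim_equal_partition_greedy : Prop := ∀ (nums : List Int), Dom_partition_greedy nums → Spec_partition_greedy nums (partition_greedy nums)

-- ===== LEMMAS AND PROOFS =====

-- index? through a prefix not containing the sought value
theorem pg_index?_append_of_not_mem (l t : List Int) (v : Int) (hv : v ∉ l) :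
    PySem.List.index? (l ++ t) v = (PySem.List.index? t v).map (· + l.length) := by
  induction l with
  | nil => simp [Option.map_id']
  | cons a l ih =>
    have ha : a ≠ v := fun h => hv (h ▸ List.mem_cons_self)
    rw [List.cons_append, PySem.List.index?_cons_of_ne _ ha,
      ih (fun h => hv (List.mem_cons_of_mem _ h)), Option.map_map]
    congr 1

-- set at the index right after a prefix
theorem pg_set_append {α : Type} (B : List α) (c : α) (t : List α) (v : α) :
    List.set (B ++ c :: t) B.length v = B ++ v :: t := by
  induction B with
  | nil => rfl
  | cons a B _ => simp

-- getD at the index right after a prefix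
theorem pg_getD_append {α : Type} (B : List α) (c : α) (t : List α) (d : α) :
    List.getD (B ++ c :: t) B.length d = c := by
  induction B with
  | nil => rfl
  | cons a B _ => simp

-- the argmin scan on a sums list of shape (positives ++ s :: zeros) with s ≤ 0 picks index |S|
theorem pg_argmin (S : List Int) (hS : ∀ x ∈ S, 0 < x) (s : Int) (hs : s ≤ 0) (m : Nat) :
    (PySem.List.index? (S ++ s :: List.replicate m 0)
      ((PySem.List.min? (S ++ s :: List.replicate m 0) (fun x => x)).getD 0)).getD 0 = S.length := by
  set L := S ++ s :: List.replicate m 0 with hL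
  have hne : L ≠ [] := by simp [hL]
  obtain ⟨m₀, hm₀⟩ : ∃ m₀, PySem.List.min? L (fun x => x) = some m₀ := by
    cases h : PySem.List.min? L (fun x => x) with
    | none => exact absurd ((PySem.List.min?_eq_none_iff L (fun x => x)).mp h) hne
    | some v => exact ⟨v, rfl⟩
  have hmem : m₀ ∈ L := PySem.List.min?_mem hm₀
  have hmin : ∀ y ∈ L, m₀ ≤ y := fun y hy => PySem.List.min?_isMin hm₀ y hy
  have hsL : s ∈ L := by simp [hL]
  have hms : m₀ ≤ s := hmin s hsL
  have hm₀s : m₀ = s := by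
    rcases List.mem_append.mp hmem with h | h
    · exact absurd hms (by have := hS _ h; omega)
    · rcases List.mem_cons.mp h with h | h
      · exact h
      · have : m₀ = 0 := List.eq_of_mem_replicate h
        omega
  have hsnot : s ∉ S := fun h => by have := hS _ h; omega
  rw [hm₀, Option.getD_some, hm₀s, hL,
    pg_index?_append_of_not_mem _ _ _ hsnot, PySem.List.index?_cons_self]
  simp

-- one step of A's loop on a structured state
theorem pg_step_split (B : List (List Int)) (S : List Int) (hlen : B.length = S.length)
    (hS : ∀ x ∈ S, 0 < x) (C : List Int) (s : Int) (hs : s ≤ 0) (m : Nat) (num : Int) :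
    pgStep (B ++ C :: List.replicate m [], S ++ s :: List.replicate m 0) num
      = (B ++ (C ++ [num]) :: List.replicate m [], S ++ (s + num) :: List.replicate m 0) := by
  have hidx := pg_argmin S hS s hs m
  simp only [pgStep, hidx, ← hlen]
  rw [pg_set_append, pg_getD_append, hlen, pg_set_append, pg_getD_append]

-- the positive phase: each positive number opens the next empty subset
theorem pg_fold_pos (pos : List Int) :
    ∀ (B : List (List Int)) (S : List Int) (m : Nat),
      B.length = S.length → (∀ x ∈ S, 0 < x) → (∀ x ∈ pos, 0 < x) → pos.length ≤ m →
      List.foldl pgStep (B ++ List.replicate m [], S ++ List.replicate m 0) pos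
        = (B ++ pos.map (fun x => [x]) ++ List.replicate (m - pos.length) [],
           S ++ pos ++ List.replicate (m - pos.length) 0) := by
  induction pos with
  | nil => intro B S m _ _ _ _; simp
  | cons a t ih =>
    intro B S m hlen hS hpos hm
    obtain ⟨k, rfl⟩ : ∃ k, m = k + 1 := ⟨m - 1, by simp at hm; omega⟩
    have h1 : List.replicate (k + 1) ([] : List Int) = [] :: List.replicate k [] := rfl
    have h2 : List.replicate (k + 1) (0 : Int) = (0 : Int) :: List.replicate k 0 := rfl
    rw [List.foldl_cons, h1, h2,
      pg_step_split B S hlen hS [] 0 le_rfl k a]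
    have ha : 0 < a := hpos a List.mem_cons_self
    have e1 : B ++ ([] ++ [a]) :: List.replicate k [] = (B ++ [[a]]) ++ List.replicate k [] := by simp
    have e2 : S ++ (0 + a) :: List.replicate k (0 : Int) = (S ++ [a]) ++ List.replicate k 0 := by simp
    rw [e1, e2, ih (B ++ [[a]]) (S ++ [a]) k (by simp [hlen])
      (by intro x hx
          rcases List.mem_append.mp hx with h | h
          · exact hS x h
          · simp at h; omega)
      (fun x hx => hpos x (List.mem_cons_of_mem _ hx)) (by simp at hm ⊢; omega)]
    simp

-- the non-positive phase: everything piles into the subset at index |S|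
theorem pg_fold_nonpos (l : List Int) (hl : ∀ x ∈ l, x ≤ 0) :
    ∀ (B : List (List Int)) (C S : List Int) (s : Int) (m : Nat),
      B.length = S.length → (∀ x ∈ S, 0 < x) → s ≤ 0 →
      List.foldl pgStep (B ++ C :: List.replicate m [], S ++ s :: List.replicate m 0) l
        = (B ++ (C ++ l) :: List.replicate m [], S ++ (s + l.sum) :: List.replicate m 0) := by
  induction l with
  | nil => intro B C S s m _ _ _; simp
  | cons a t ih =>
    intro B C S s m hlen hS hs
    have ha : a ≤ 0 := hl a List.mem_cons_self
    rw [List.foldl_cons, pg_step_split B S hlen hS C s hs m a,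
      ih (fun x hx => hl x (List.mem_cons_of_mem _ hx)) B (C ++ [a]) S (s + a) m hlen hS (by omega)]
    simp [add_assoc]

-- sorting descending splits into the descending positives followed by the descending non-positives
theorem pg_sorted_split (nums : List Int) :
    PySem.List.sorted nums (fun x => x) true
      = PySem.List.sorted (nums.filter (fun x => decide (0 < x))) (fun x => x) true
        ++ PySem.List.sorted (nums.filter (fun x => decide (x ≤ 0))) (fun x => x) true := by
  have hfc : nums.filter (fun x => decide (x ≤ 0)) = nums.filter (fun x => !decide (0 < x)) :=
    List.filter_congr (fun x _ => by rw [← decide_not]; exact decide_eq_decide.mpr (by omega))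
  have hperm : (PySem.List.sorted nums (fun x => x) true).Perm
      (PySem.List.sorted (nums.filter (fun x => decide (0 < x))) (fun x => x) true
        ++ PySem.List.sorted (nums.filter (fun x => decide (x ≤ 0))) (fun x => x) true) := by
    refine (PySem.List.sorted_perm _ _ _).trans ?_
    refine (((PySem.List.sorted_perm _ _ _).append (PySem.List.sorted_perm _ _ _)).trans ?_).symm
    rw [hfc]
    exact List.filter_append_perm _ nums
  refine List.Perm.eq_of_pairwise (fun a b _ _ h1 h2 => le_antisymm h2 h1)
    (PySem.List.sorted_pairwise_rev _ _) ?_ hperm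
  refine List.pairwise_append.mpr
    ⟨PySem.List.sorted_pairwise_rev _ _, PySem.List.sorted_pairwise_rev _ _, ?_⟩
  intro a ha b hb
  have ha' : 0 < a := by
    have := (PySem.List.mem_sorted _ _ _ a).mp ha
    simpa using (List.mem_filter.mp this).2
  have hb' : b ≤ 0 := by
    have := (PySem.List.mem_sorted _ _ _ b).mp hb
    simpa using (List.mem_filter.mp this).2
  omega

-- the whole loop of A, against B's closed form
theorem pg_main (n : Nat) (pos nonpos : List Int) (hpos : ∀ x ∈ pos, 0 < x)
    (hnonpos : ∀ x ∈ nonpos, x ≤ 0) (hlen : pos.length + nonpos.length = n) :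
    List.foldl pgStep (List.replicate n ([] : List Int), List.replicate n (0 : Int)) (pos ++ nonpos)
      = ((if nonpos = [] then pos.map (fun x => [x]) else pos.map (fun x => [x]) ++ [nonpos])
           ++ List.replicate (n - (if nonpos = [] then pos.map (fun x => [x]) else pos.map (fun x => [x]) ++ [nonpos]).length) [],
         (if nonpos = [] then pos else pos ++ [nonpos.sum])
           ++ List.replicate (n - (if nonpos = [] then pos else pos ++ [nonpos.sum]).length) 0) := by
  rw [List.foldl_append,
    show (List.replicate n ([] : List Int)) = [] ++ List.replicate n [] from rfl,
    show (List.replicate n (0 : Int)) = [] ++ List.replicate n 0 from rfl,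
    pg_fold_pos pos [] [] n rfl (by simp) hpos (by omega)]
  cases nonpos with
  | nil =>
    have h1 : n - pos.length = 0 := by simp at hlen; omega
    simp [h1]
  | cons c rest =>
    have hc : c ≤ 0 := hnonpos c List.mem_cons_self
    have hrest : ∀ x ∈ rest, x ≤ 0 := fun x hx => hnonpos x (List.mem_cons_of_mem _ hx)
    have hk : n - pos.length = rest.length + 1 := by simp at hlen; omega
    rw [List.nil_append, List.nil_append, hk,
      show List.replicate (rest.length + 1) ([] : List Int) = [] :: List.replicate rest.length [] from rfl,
      show List.replicate (rest.length + 1) (0 : Int) = (0 : Int) :: List.replicate rest.length 0 from rfl,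
      List.foldl_cons,
      pg_step_split (pos.map fun x => [x]) pos (by simp) hpos [] 0 le_rfl rest.length c,
      pg_fold_nonpos rest hrest (pos.map fun x => [x]) ([] ++ [c]) pos (0 + c) rest.length
        (by simp) hpos (by omega)]
    have h2 : n - (pos.length + 1) = rest.length := by omega
    simp [h2]

-- ===== VERDICT (by name: the statement is the Claim_ definition above) =====
theorem partition_greedy_spec : Claim_equal_partition_greedy := by
  intro nums _
  show partition_greedy nums = partition_greedy_alt nums
  simp only [partition_greedy, partition_greedy_alt]
  rw [pg_sorted_split nums]
  refine pg_main nums.length _ _ ?_ ?_ ?_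
  · intro x hx
    have := (PySem.List.mem_sorted _ _ _ x).mp hx
    simpa using (List.mem_filter.mp this).2
  · intro x hx
    have := (PySem.List.mem_sorted _ _ _ x).mp hx
    simpa using (List.mem_filter.mp this).2
  · simp only [PySem.List.length_sorted]
    have hfc : nums.filter (fun x => decide (x ≤ 0)) = nums.filter (fun x => !decide (0 < x)) :=
      List.filter_congr (fun x _ => by rw [← decide_not]; exact decide_eq_decide.mpr (by omega))
    rw [hfc]
    simpa using (List.filter_append_perm (fun x => decide (0 < x)) nums).length_eq
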